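-- pv_equiv track=rewrite | github.com/dobreffandras/AdventOfCode2022 | Day8/day8_b.py | generate_tree_neighbors
-- ===== SOURCE A (Python) =====
-- def generate_tree_neighbors(trees):
--     h = len(trees)
--     w = len(trees[0])
--
--     trees_with_neighbors = []
--
--     for row_idx in range(h):
--         for col_idx in range(w):
--             row = trees[row_idx]
--             col = [trees[x][col_idx] for x in range(h)]
--
--             tree = trees[row_idx][col_idx]
--             left_neighbors = list(reversed(row[0:col_idx]))
--             right_neighbors = row[(col_idx+1):w]
--             top_neighbors = list(reversed(col[0:row_idx]))
--             bottom_neighbors = col[(row_idx+1):h]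
--
--             trees_with_neighbors.append((tree, dict(left=left_neighbors, right=right_neighbors, top=top_neighbors, bottom=bottom_neighbors)))
--
--     return trees_with_neighbors
-- ===== SOURCE B (Python) =====
-- def generate_tree_neighbors(trees):
--     # Precompute, per row and per column, all left/right (resp. top/bottom)
--     # neighbor lists incrementally, then assemble cells row-major.
--     w = len(trees[0])
--     grid = [row[:w] for row in trees]
--     cols = [[row[c] for row in grid] for c in range(w)]
--
--     def rev_prefixes(xs):
--         # out[i] == list(reversed(xs[:i])), built by pushing each element on front
--         out, acc = [], []
--         for x in xs:
--             out.append(acc)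
--             acc = [x] + acc
--         return out
--
--     def tails(xs):
--         # out[i] == xs[i+1:], built back-to-front
--         out, acc = [], []
--         for x in reversed(xs):
--             out.append(acc)
--             acc = [x] + acc
--         out.reverse()
--         return out
--
--     lefts = [rev_prefixes(row) for row in grid]
--     rights = [tails(row) for row in grid]
--     tops = [rev_prefixes(col) for col in cols]
--     bottoms = [tails(col) for col in cols]
--
--     result = []
--     for r, row in enumerate(grid):
--         for c, tree in enumerate(row):
--             result.append((tree, dict(left=lefts[r][c], right=rights[r][c],
--                                       top=tops[c][r], bottom=bottoms[c][r])))
--     return result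
-- ===== Notes on version B (the rewrite author's own statement) =====
-- stated objective: alternative
-- what changed: B precomputes the whole column table and all four per-row/per-column neighbor-list tables (reversed prefixes and tails built incrementally by consing) before a single assembly pass, instead of A's per-cell column rescan and per-cell slicing.
import Mathlib
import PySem

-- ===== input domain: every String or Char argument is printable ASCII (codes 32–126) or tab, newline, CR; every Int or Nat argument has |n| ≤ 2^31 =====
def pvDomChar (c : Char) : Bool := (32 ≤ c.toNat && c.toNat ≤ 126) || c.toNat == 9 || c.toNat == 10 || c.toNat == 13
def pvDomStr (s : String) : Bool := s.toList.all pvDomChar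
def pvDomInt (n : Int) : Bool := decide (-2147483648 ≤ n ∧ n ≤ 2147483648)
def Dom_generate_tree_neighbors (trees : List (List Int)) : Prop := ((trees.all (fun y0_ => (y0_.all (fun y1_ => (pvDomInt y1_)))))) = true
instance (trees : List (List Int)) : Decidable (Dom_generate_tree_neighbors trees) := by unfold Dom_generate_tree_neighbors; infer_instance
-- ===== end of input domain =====

-- B precomputes all four neighbor lists per row/column incrementally (reversed prefixes and
-- tails built by consing) instead of A's per-cell column rescans and slicing; objective: alternative.

-- ===== PORT A =====
def generate_tree_neighbors (trees : List (List Int)) : List (Int × (List (String × List Int))) :=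
  let h : Int := trees.length
  let w : Int := ((PySem.List.pyGetD trees 0 []).length : Int)   -- len(trees[0]); Pre_ guarantees trees ≠ []
  (PySem.List.pyRange 0 h).foldl (fun acc row_idx =>
    (PySem.List.pyRange 0 w).foldl (fun acc col_idx =>
      let row := PySem.List.pyGetD trees row_idx []
      let col := (PySem.List.pyRange 0 h).map
        (fun x => PySem.List.pyGetD (PySem.List.pyGetD trees x []) col_idx 0)
      let tree := PySem.List.pyGetD (PySem.List.pyGetD trees row_idx []) col_idx 0
      let left_neighbors := (PySem.List.slice row (some 0) (some col_idx)).reverse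
      let right_neighbors := PySem.List.slice row (some (col_idx + 1)) (some w)
      let top_neighbors := (PySem.List.slice col (some 0) (some row_idx)).reverse
      let bottom_neighbors := PySem.List.slice col (some (row_idx + 1)) (some h)
      acc ++ [(tree, [("left", left_neighbors), ("right", right_neighbors),
                      ("top", top_neighbors), ("bottom", bottom_neighbors)])]) acc) []

-- ===== PORT B =====
-- one step of the shared accumulator loop in rev_prefixes/tails: out.append(acc); acc = [x] + acc
def pvFoldStep (p : List (List Int) × List Int) (x : Int) : List (List Int) × List Int :=
  (p.1 ++ [p.2], x :: p.2)

def pvRevPrefixes (xs : List Int) : List (List Int) :=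
  (xs.foldl pvFoldStep ([], [])).1

def pvTails (xs : List Int) : List (List Int) :=
  ((xs.reverse.foldl pvFoldStep ([], [])).1).reverse

def generate_tree_neighbors_alt (trees : List (List Int)) : List (Int × (List (String × List Int))) :=
  let w : Int := ((PySem.List.pyGetD trees 0 []).length : Int)   -- len(trees[0]); Pre_ guarantees trees ≠ []
  let grid := trees.map (fun row => PySem.List.slice row none (some w))
  let cols := (PySem.List.pyRange 0 w).map (fun c => grid.map (fun row => PySem.List.pyGetD row c 0))
  let lefts := grid.map pvRevPrefixes
  let rights := grid.map pvTails
  let tops := cols.map pvRevPrefixes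
  let bottoms := cols.map pvTails
  (PySem.List.enumerate grid).foldl (fun acc rp =>
    (PySem.List.enumerate rp.2).foldl (fun acc cp =>
      acc ++ [(cp.2,
        [("left", PySem.List.pyGetD (PySem.List.pyGetD lefts rp.1 []) cp.1 []),
         ("right", PySem.List.pyGetD (PySem.List.pyGetD rights rp.1 []) cp.1 []),
         ("top", PySem.List.pyGetD (PySem.List.pyGetD tops cp.1 []) rp.1 []),
         ("bottom", PySem.List.pyGetD (PySem.List.pyGetD bottoms cp.1 []) rp.1 [])])]) acc) []

-- ===== PRECONDITION & SPEC =====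
-- Pre_ excludes exactly the inputs on which A raises: the empty grid (trees[0] -> IndexError)
-- and grids in which some row is shorter than the first row (trees[x][col_idx] -> IndexError).
def Pre_generate_tree_neighbors (trees : List (List Int)) : Prop :=
  trees ≠ [] ∧ ∀ row ∈ trees, (trees.headD []).length ≤ row.length
instance (trees : List (List Int)) : Decidable (Pre_generate_tree_neighbors trees) := by
  unfold Pre_generate_tree_neighbors; infer_instance

def pvWitness_generate_tree_neighbors : List (List Int) := [[3, 0], [2, 5]]

def Spec_generate_tree_neighbors (trees : List (List Int)) (out : List (Int × (List (String × List Int)))) : Prop := out = generate_tree_neighbors_alt trees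
instance (trees : List (List Int)) (out : List (Int × (List (String × List Int)))) : Decidable (Spec_generate_tree_neighbors trees out) := by unfold Spec_generate_tree_neighbors; infer_instance

-- ===== CLAIM (what is proved, stated in full; the proofs are below) =====
def Claim_equal_generate_tree_neighbors : Prop := ∀ (trees : List (List Int)), Dom_generate_tree_neighbors trees → Pre_generate_tree_neighbors trees → Spec_generate_tree_neighbors trees (generate_tree_neighbors trees)

-- ===== LEMMAS AND PROOFS =====

-- characterization of the shared accumulator fold of rev_prefixes/tails
theorem pvFoldStep_spec (xs : List Int) (out : List (List Int)) (acc : List Int) :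
    xs.foldl pvFoldStep (out, acc)
      = (out ++ (List.range xs.length).map (fun i => (xs.take i).reverse ++ acc),
         xs.reverse ++ acc) := by
  induction xs generalizing out acc with
  | nil => simp
  | cons x xs ih =>
      simp only [List.foldl_cons, pvFoldStep, ih, List.length_cons, List.range_succ_eq_map,
        List.map_cons, List.map_map]
      refine Prod.ext ?_ (by simp)
      simp [Function.comp_def, List.append_assoc]

theorem pvRevPrefixes_eq (xs : List Int) :
    pvRevPrefixes xs = (List.range xs.length).map (fun i => (xs.take i).reverse) := by
  simp [pvRevPrefixes, pvFoldStep_spec]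

theorem pvRevPrefixes_getD (xs : List Int) (i : Nat) (h : i < xs.length) :
    (pvRevPrefixes xs).getD i [] = (xs.take i).reverse := by
  rw [pvRevPrefixes_eq, PySem.List.getD_map_range _ _ _ _ h]

theorem pvTails_getD (xs : List Int) (i : Nat) (h : i < xs.length) :
    (pvTails xs).getD i [] = xs.drop (i + 1) := by
  have hx : (xs.reverse.foldl pvFoldStep ([], [])).1
      = (List.range xs.length).map (fun j => (xs.reverse.take j).reverse) := by
    rw [pvFoldStep_spec]
    simp
  have hl : i < (((List.range xs.length).map (fun j => (xs.reverse.take j).reverse)).reverse).length := by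
    simpa using h
  rw [pvTails, hx, List.getD_eq_getElem _ _ hl, List.getElem_reverse]
  simp only [List.getElem_map, List.getElem_range, List.length_map, List.length_range]
  rw [List.take_reverse, List.reverse_reverse]
  congr 1
  omega

-- indexing a whole list through range: [f(xs[j]) for j in range(len(xs))] = map f xs
theorem map_getD_range {α β : Type} (xs : List α) (f : α → β) (d : α) :
    (List.range xs.length).map (fun j => f (xs.getD j d)) = xs.map f := by
  apply List.ext_getElem <;> simp
  intro i h1 h2
  simp [List.getElem?_eq_getElem h2]

-- ===== VERDICT (by name: the statement is the Claim_ definition above) =====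
theorem generate_tree_neighbors_spec : Claim_equal_generate_tree_neighbors := by
  intro trees _ hpre
  obtain ⟨hne, hwle⟩ := hpre
  unfold Spec_generate_tree_neighbors generate_tree_neighbors generate_tree_neighbors_alt
  simp only [PySem.List.foldl_append_singleton_eq_map, PySem.List.foldl_append_eq_flatMap,
    List.nil_append]
  have h0 : PySem.List.pyGetD trees 0 ([] : List Int) = trees.headD [] := by
    cases trees with
    | nil => exact absurd rfl hne
    | cons t ts => simp [PySem.List.pyGetD_zero_cons t ts ([] : List Int)]
  rw [h0, PySem.List.enumerate_eq_map_pyRange _ ([] : List Int)]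
  simp only [PySem.List.len_eq, List.length_map, PySem.List.slice_to_natCast,
    PySem.List.pyRange_zero_nat, List.flatMap_map, List.map_map]
  refine List.flatMap_congr ?_
  intro r hr
  have hrn : r < trees.length := List.mem_range.mp hr
  simp only [Function.comp_def, PySem.List.pyGetD_natCast]
  have hgrid : (List.map (fun row => List.take (trees.headD []).length row) trees).getD r []
      = (trees[r]'hrn).take (trees.headD []).length := by
    rw [List.getD_eq_getElem _ _ (by simpa using hrn)]
    simp
  have hlen : ((trees[r]'hrn).take (trees.headD []).length).length = (trees.headD []).length := by
    simp only [List.length_take]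
    exact Nat.min_eq_left (hwle _ (List.getElem_mem hrn))
  rw [hgrid, PySem.List.enumerate_eq_map_pyRange _ (0 : Int)]
  simp only [PySem.List.len_eq, hlen, PySem.List.pyRange_zero_nat, List.map_map]
  refine List.map_congr_left ?_
  intro c hc
  have hcw : c < (trees.headD []).length := List.mem_range.mp hc
  simp only [Function.comp_def, PySem.List.pyGetD_natCast]
  have hR : trees.getD r [] = trees[r]'hrn := List.getD_eq_getElem _ _ hrn
  have hRlen : (trees.headD []).length ≤ (trees[r]'hrn).length := hwle _ (List.getElem_mem hrn)
  have hc1 : ((c : Int) + 1) = (((c + 1 : Nat)) : Int) := by push_cast; ring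
  have hr1 : ((r : Int) + 1) = (((r + 1 : Nat)) : Int) := by push_cast; ring
  have hcol : List.map (fun row => (List.take (trees.headD []).length row).getD c 0) trees
      = List.map (fun row => row.getD c 0) trees := by
    refine List.map_congr_left ?_
    intro row hrow'
    have h1 : c < (List.take (trees.headD []).length row).length := by
      simp only [List.length_take]
      exact lt_min hcw (Nat.lt_of_lt_of_le hcw (hwle _ hrow'))
    rw [List.getD_eq_getElem _ _ h1, List.getElem_take,
      List.getD_eq_getElem _ _ (Nat.lt_of_lt_of_le hcw (hwle _ hrow'))]
  have hcolN : (List.map (fun row => row.getD c 0) trees).length = trees.length := List.length_map ..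
  -- reduce B-side table lookups
  have hlefts : (List.map (fun x => pvRevPrefixes (List.take (trees.headD []).length x)) trees).getD r []
      = pvRevPrefixes (List.take (trees.headD []).length (trees[r]'hrn)) := by
    rw [List.getD_eq_getElem _ _ (by simpa using hrn)]; simp
  have hrights : (List.map (fun x => pvTails (List.take (trees.headD []).length x)) trees).getD r []
      = pvTails (List.take (trees.headD []).length (trees[r]'hrn)) := by
    rw [List.getD_eq_getElem _ _ (by simpa using hrn)]; simp
  rw [map_getD_range trees (fun row => row.getD c 0) [], hlefts, hrights,
    PySem.List.getD_map_range _ _ _ _ hcw, PySem.List.getD_map_range _ _ _ _ hcw, hcol, hR]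
  have hcW : c < (List.take (trees.headD []).length (trees[r]'hrn)).length := by
    rw [hlen]; exact hcw
  refine Prod.ext ?_ ?_
  · -- the tree itself
    rw [List.getD_eq_getElem _ _ hcW, List.getElem_take,
      List.getD_eq_getElem _ _ (Nat.lt_of_lt_of_le hcw hRlen)]
  · simp only
    congr 1
    · -- left
      rw [pvRevPrefixes_getD _ _ hcW, PySem.List.slice_zero_start, PySem.List.slice_to_natCast,
        List.take_take, Nat.min_eq_left (Nat.le_of_lt hcw)]
    congr 1
    · -- right
      rw [pvTails_getD _ _ hcW, hc1, PySem.List.slice_natCast, List.drop_take]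
    congr 1
    · -- top
      rw [pvRevPrefixes_getD _ _ (by rw [hcolN]; exact hrn), PySem.List.slice_zero_start,
        PySem.List.slice_to_natCast]
    congr 1
    · -- bottom
      rw [pvTails_getD _ _ (by rw [hcolN]; exact hrn), hr1]
      rw [show ((trees.length : Int)) = (((trees.length : Nat)) : Int) from rfl,
        PySem.List.slice_natCast]
      exact congrArg (Prod.mk "bottom") (List.take_of_length_le (by simp))
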